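-- pv_equiv track=rewrite | github.com/Oleksandr-Uvarov/coursematerial_2425 | 07-tuples/11-assignment-heatwave/student.py | heatwave
-- ===== SOURCE A (Python) =====
-- def heatwave(temperatures):
--     count = 0
--     count_thirty = 0
--     for temperature in temperatures:
--         if temperature >= 25:
--             count += 1
--             if temperature >= 30:
--                 count_thirty += 1
--
--             if count >= 5 and count_thirty >= 3:
--                 return True
--         else:
--             count = 0
--             count_thirty = 0
--     return False
-- ===== SOURCE B (Python) =====
-- def _split_hot(xs, i):
--     """Collect the maximal run of hot days (>= 25) starting at index i;
--     return the run and the index just past it."""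
--     run = []
--     while i < len(xs) and xs[i] >= 25:
--         run.append(xs[i])
--         i += 1
--     return run, i
--
--
-- def heatwave(temperatures):
--     n = len(temperatures)
--     i = 0
--     while i < n:
--         if temperatures[i] >= 25:
--             run, i = _split_hot(temperatures, i)
--             if len(run) >= 5 and sum(1 for x in run if x >= 30) >= 3:
--                 return True
--         else:
--             i += 1
--     return False
-- ===== Notes on version B (the rewrite author's own statement) =====
-- stated objective: alternative
-- what changed: Instead of scanning with running counters reset on cold days, B splits the input into maximal runs of days >= 25 and checks each whole run's length and its count of days >= 30, relying on monotonicity of both counts within a run.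
import Mathlib
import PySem

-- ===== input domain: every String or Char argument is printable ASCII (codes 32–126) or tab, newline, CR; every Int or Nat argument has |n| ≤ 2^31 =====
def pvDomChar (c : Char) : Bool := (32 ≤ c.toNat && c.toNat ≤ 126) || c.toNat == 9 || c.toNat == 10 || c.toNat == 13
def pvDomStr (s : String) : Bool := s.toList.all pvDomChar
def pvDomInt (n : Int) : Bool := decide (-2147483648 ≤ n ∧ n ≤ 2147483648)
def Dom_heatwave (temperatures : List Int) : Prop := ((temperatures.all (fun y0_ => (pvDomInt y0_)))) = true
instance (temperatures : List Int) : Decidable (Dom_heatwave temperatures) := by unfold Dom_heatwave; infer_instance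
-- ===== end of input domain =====

-- B replaces A's running-counter scan by splitting the input into maximal hot runs and
-- checking each whole run (alternative decomposition; same asymptotic cost).


-- ===== PORT A =====
-- the for-loop with counters `count`, `count_thirty` and early `return True`
def heatwaveLoop : List Int → Int → Int → Bool
  | [], _, _ => false
  | t :: ts, count, count_thirty =>
    if 25 ≤ t then
      let count' := count + 1
      let count_thirty' := if 30 ≤ t then count_thirty + 1 else count_thirty
      if 5 ≤ count' ∧ 3 ≤ count_thirty' then true
      else heatwaveLoop ts count' count_thirty'
    else heatwaveLoop ts 0 0

def heatwave (temperatures : List Int) : Bool := heatwaveLoop temperatures 0 0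

-- ===== PORT B =====
-- _split_hot: the maximal hot prefix and the remainder
def splitHot : List Int → List Int × List Int
  | [] => ([], [])
  | x :: xs => if x < 25 then ([], x :: xs) else
      let p := splitHot xs
      (x :: p.1, p.2)

theorem splitHot_snd_length (xs : List Int) : (splitHot xs).2.length ≤ xs.length := by
  induction xs with
  | nil => simp [splitHot]
  | cons x xs ih => simp only [splitHot]; split <;> simp; omega

def heatwave_alt (temperatures : List Int) : Bool :=
  match temperatures with
  | [] => false
  | t :: tail =>
    if 25 ≤ t then
      let p := splitHot tail
      let run := t :: p.1
      if 5 ≤ run.length ∧ 3 ≤ (run.filter (fun x => decide (30 ≤ x))).length then true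
      else heatwave_alt p.2
    else heatwave_alt tail
termination_by temperatures.length
decreasing_by
  · have := splitHot_snd_length tail; simp; omega
  · simp

-- ===== PRECONDITION & SPEC =====
def Spec_heatwave (temperatures : List Int) (out : Bool) : Prop := out = heatwave_alt temperatures
instance (temperatures : List Int) (out : Bool) : Decidable (Spec_heatwave temperatures out) := by unfold Spec_heatwave; infer_instance

-- ===== CLAIM (what is proved, stated in full; the proofs are below) =====
def Claim_equal_heatwave : Prop := ∀ (temperatures : List Int), Dom_heatwave temperatures → Spec_heatwave temperatures (heatwave temperatures)

-- ===== LEMMAS AND PROOFS =====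

theorem splitHot_append (xs : List Int) : (splitHot xs).1 ++ (splitHot xs).2 = xs := by
  induction xs with
  | nil => simp [splitHot]
  | cons x xs ih => simp only [splitHot]; split <;> simp [ih]

theorem splitHot_fst_hot (xs : List Int) : ∀ x ∈ (splitHot xs).1, 25 ≤ x := by
  induction xs with
  | nil => simp [splitHot]
  | cons x xs ih =>
    simp only [splitHot]; split
    · simp
    · intro y hy
      simp only [List.mem_cons] at hy
      rcases hy with rfl | hy
      · omega
      · exact ih y hy

theorem splitHot_snd_head (xs : List Int) :
    ∀ y, (splitHot xs).2.head? = some y → y < 25 := by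
  induction xs with
  | nil => simp [splitHot]
  | cons x xs ih =>
    simp only [splitHot]; split
    · intro y hy; simp at hy; omega
    · exact ih

-- cold (or absent) head resets the counters
theorem loop_reset (rest : List Int) (c c30 : Int)
    (hcold : ∀ y, rest.head? = some y → y < 25) :
    heatwaveLoop rest c c30 = heatwaveLoop rest 0 0 := by
  cases rest with
  | nil => rfl
  | cons y ys =>
    have hy : y < 25 := hcold y rfl
    simp only [heatwaveLoop]
    rw [if_neg (by omega), if_neg (by omega)]

-- the key run lemma: within a fully-hot prefix the early-exit check is monotone, so
-- A's scan through the run equals one check of the whole run's counts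
theorem run_lemma (hs : List Int) :
    ∀ (rest : List Int) (c c30 : Int),
    (∀ x ∈ hs, 25 ≤ x) →
    (∀ y, rest.head? = some y → y < 25) →
    ¬ (5 ≤ c ∧ 3 ≤ c30) →
    heatwaveLoop (hs ++ rest) c c30 =
      if 5 ≤ c + (hs.length : Int) ∧
         3 ≤ c30 + ((hs.filter (fun x => decide (30 ≤ x))).length : Int)
      then true else heatwaveLoop rest 0 0 := by
  induction hs with
  | nil =>
    intro rest c c30 _ hcold hnc
    rw [if_neg (by simpa using hnc)]
    simpa using loop_reset rest c c30 hcold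
  | cons h hs ih =>
    intro rest c c30 hhot hcold hnc
    have hh : 25 ≤ h := hhot h (by simp)
    have hfl : (0 : Int) ≤ ((hs.filter (fun x => decide (30 ≤ x))).length : Int) := by positivity
    have hl : (0 : Int) ≤ (hs.length : Int) := by positivity
    simp only [List.cons_append, heatwaveLoop, if_pos hh]
    by_cases hc : 5 ≤ c + 1 ∧ 3 ≤ (if 30 ≤ h then c30 + 1 else c30)
    · rw [if_pos hc, if_pos]
      refine ⟨by simp only [List.length_cons]; push_cast; omega, ?_⟩
      have h2 := hc.2
      simp only [List.filter_cons]
      by_cases h30 : (30 : Int) ≤ h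
      · rw [if_pos h30] at h2
        simp only [h30, decide_true, if_true, List.length_cons]
        push_cast; omega
      · rw [if_neg h30] at h2
        simp only [h30, decide_false]
        push_cast; omega
    · rw [if_neg hc]
      rw [ih rest (c + 1) (if 30 ≤ h then c30 + 1 else c30)
            (fun x hx => hhot x (by simp [hx])) hcold hc]
      by_cases h30 : (30 : Int) ≤ h
      · simp only [List.filter_cons, h30, decide_true, if_true,
          List.length_cons]
        congr 1
        apply propext
        push_cast
        constructor <;> rintro ⟨a, b⟩ <;> exact ⟨by omega, by omega⟩
      · simp only [List.filter_cons, h30, decide_false, if_false,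
          List.length_cons]
        congr 1
        apply propext
        push_cast
        constructor <;> rintro ⟨a, b⟩ <;> exact ⟨by omega, by omega⟩

theorem loop_eq_alt : ∀ (n : Nat) (ts : List Int), ts.length = n →
    heatwaveLoop ts 0 0 = heatwave_alt ts := by
  intro n
  induction n using Nat.strong_induction_on with
  | _ n ih =>
    intro ts hlen
    cases ts with
    | nil => simp [heatwaveLoop, heatwave_alt]
    | cons t tail =>
      by_cases ht : 25 ≤ t
      · have hsplit := splitHot_append tail
        have hrun : heatwaveLoop (t :: tail) 0 0 =
            heatwaveLoop ((t :: (splitHot tail).1) ++ (splitHot tail).2) 0 0 := by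
          simp [hsplit]
        have hhot : ∀ x ∈ t :: (splitHot tail).1, 25 ≤ x := by
          intro x hx
          rcases List.mem_cons.mp hx with rfl | hx
          · exact ht
          · exact splitHot_fst_hot tail x hx
        rw [hrun, run_lemma _ _ 0 0 hhot (splitHot_snd_head tail) (by omega)]
        rw [heatwave_alt]
        simp only [if_pos ht]
        have hcond : (5 ≤ (0:Int) + ((t :: (splitHot tail).1).length : Int) ∧
            3 ≤ (0:Int) + (((t :: (splitHot tail).1).filter (fun x => decide (30 ≤ x))).length : Int)) ↔
            (5 ≤ (t :: (splitHot tail).1).length ∧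
             3 ≤ ((t :: (splitHot tail).1).filter (fun x => decide (30 ≤ x))).length) := by
          constructor <;> rintro ⟨a, b⟩ <;> exact ⟨by omega, by omega⟩
        rw [if_congr hcond rfl rfl]
        have hrest : heatwaveLoop (splitHot tail).2 0 0 = heatwave_alt (splitHot tail).2 := by
          apply ih (splitHot tail).2.length _ _ rfl
          have := splitHot_snd_length tail
          simp only [← hlen, List.length_cons]
          omega
        rw [hrest]
      · have : heatwaveLoop (t :: tail) 0 0 = heatwaveLoop tail 0 0 := by
          simp only [heatwaveLoop]
          rw [if_neg ht]
        rw [this, heatwave_alt]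
        simp only [if_neg ht]
        apply ih tail.length _ _ rfl
        simp [← hlen]

-- ===== VERDICT (by name: the statement is the Claim_ definition above) =====
theorem heatwave_spec : Claim_equal_heatwave := by
  intro ts _
  unfold Spec_heatwave heatwave
  exact loop_eq_alt ts.length ts rfl
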